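-- pv_equiv track=rewrite | github.com/Mulsanne2/DS-RAG | dataset/utils/utils.py | compose_entity_dict
-- ===== SOURCE A (Python) =====
-- def compose_entity_dict(entities, question):
--     entity_dict = {}
--     splitted_entities = entities.split("\t")
--     splitted_entities = [entity.strip() for entity in entities.split("\t") if len(entity.strip()) > 0]
--     splitted_entities = sorted(splitted_entities, key=len, reverse=True)
--
--     entity_num = 1
--     i = 0
--
--     while i < len(question):
--         found = False
--         for entity in splitted_entities:
--             if len(entity) == 0:
--                 continue
--             if question[i:i+len(entity)].lower() == entity.lower() and len(entity) > 0:
--                 # If a matching entity is found, assign a number and add it to the dict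
--                 entity_dict[f"e{entity_num}"] = entity
--                 entity_num += 1
--                 i += len(entity)  # Skip the index by the length of the matched entity
--                 found = True
--                 break
--         # If no match is found, move to the next character
--         if not found:
--             i += 1
--
--     return entity_dict
-- ===== SOURCE B (Python) =====
-- def compose_entity_dict(entities, question):
--     # Group entities by length once (no sort of the entity list); at each position
--     # try only the distinct lengths, longest first, with one hash lookup per length.
--     by_len = {}
--     for raw in entities.split("\t"):
--         e = raw.strip()
--         if e:
--             inner = by_len.get(len(e))
--             if inner is None:
--                 inner = {}
--                 by_len[len(e)] = inner
--             if e.lower() not in inner: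
--                 inner[e.lower()] = e
--     lengths = sorted(by_len, reverse=True)
--     ql = question.lower()
--     result = {}
--     num = 1
--     i = 0
--     n = len(question)
--     while i < n:
--         hit = None
--         for L in lengths:
--             ent = by_len[L].get(ql[i:i+L])
--             if ent is not None:
--                 hit = (L, ent)
--                 break
--         if hit is None:
--             i += 1
--         else:
--             result[f"e{num}"] = hit[1]
--             num += 1
--             i += hit[0]
--     return result
-- ===== Notes on version B (the rewrite author's own statement) =====
-- stated objective: faster
-- what changed: Instead of sorting all entities by length and scanning the whole sorted entity list at every question position, B groups entities once into a hash table keyed by (length, lowercased text), lowercases the question once, and at each position tries only the distinct entity lengths (longest first) with one dict lookup each, so the inner scan over all entities disappears.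
import Mathlib
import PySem

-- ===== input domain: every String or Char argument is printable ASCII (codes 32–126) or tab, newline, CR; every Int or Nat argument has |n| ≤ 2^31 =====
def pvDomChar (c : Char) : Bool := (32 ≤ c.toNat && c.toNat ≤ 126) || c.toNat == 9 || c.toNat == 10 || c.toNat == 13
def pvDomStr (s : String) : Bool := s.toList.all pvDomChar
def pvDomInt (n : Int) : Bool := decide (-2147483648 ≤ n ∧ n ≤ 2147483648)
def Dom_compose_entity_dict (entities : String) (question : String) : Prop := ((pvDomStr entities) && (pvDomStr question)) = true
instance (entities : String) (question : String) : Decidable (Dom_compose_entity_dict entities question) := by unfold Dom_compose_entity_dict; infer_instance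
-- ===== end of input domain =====

-- B groups the entities by length into hash maps built once and lowercases the question once,
-- so the per-position scan over the whole sorted entity list becomes one lookup per distinct length (faster).


-- ===== PORT A =====
-- `if len(entity)==0: continue` / `question[i:i+len(entity)].lower() == entity.lower() and len(entity) > 0`
def composeA_pred (q : List Char) (i : Int) (e : List Char) : Bool :=
  if PySem.List.len e = 0 then false
  else (PySem.Chars.lower (PySem.List.slice q (some i) (some (i + PySem.List.len e))) == PySem.Chars.lower e)
       && decide (0 < PySem.List.len e)

-- the while loop of A (fuel = len(question); i advances by ≥ 1 per iteration)
def composeA_loop (S : List (List Char)) (q : List Char) :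
    Nat → Int → Int → PySem.Dict String String → PySem.Dict String String
  | 0, _, _, d => d
  | fuel+1, i, num, d =>
    if i < PySem.List.len q then
      match S.find? (composeA_pred q i) with
      | some e => composeA_loop S q fuel (i + PySem.List.len e) (num + 1)
                    (d.insert ("e" ++ PySem.Int.toStr num) (String.ofList e))
      | none => composeA_loop S q fuel (i + 1) num d
    else d

def compose_entity_dict (entities : String) (question : String) : List (String × String) :=
  let splitted := PySem.Chars.splitOn entities.toList ['\t']
  let splitted := (splitted.filter (fun e => decide (0 < PySem.List.len (PySem.Chars.strip e)))).map PySem.Chars.strip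
  let splitted := PySem.List.sorted splitted (fun e => PySem.List.len e) true
  (composeA_loop splitted question.toList question.toList.length 0 1 PySem.Dict.empty).items

-- ===== PORT B =====
-- body of B's grouping loop: strip, skip empties, setdefault-style insert into by_len[len(e)]
def composeB_step (byLen : PySem.Dict Int (PySem.Dict (List Char) (List Char))) (raw : List Char) :
    PySem.Dict Int (PySem.Dict (List Char) (List Char)) :=
  let e := PySem.Chars.strip raw
  if PySem.List.len e = 0 then byLen
  else
    let key := PySem.Chars.lower e
    let inner := byLen.getD (PySem.List.len e) PySem.Dict.empty
    let inner := if inner.contains key then inner else inner.insert key e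
    byLen.insert (PySem.List.len e) inner

-- the inner `for L in lengths` loop with its dict lookup
def composeB_find (byLen : PySem.Dict Int (PySem.Dict (List Char) (List Char)))
    (ql : List Char) (i : Int) : List Int → Option (Int × List Char)
  | [] => none
  | L :: rest =>
    match (byLen.getD L PySem.Dict.empty).get? (PySem.List.slice ql (some i) (some (i + L))) with
    | some ent => some (L, ent)
    | none => composeB_find byLen ql i rest

-- the while loop of B
def composeB_loop (byLen : PySem.Dict Int (PySem.Dict (List Char) (List Char)))
    (lengths : List Int) (ql : List Char) (n : Int) :
    Nat → Int → Int → PySem.Dict String String → PySem.Dict String String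
  | 0, _, _, d => d
  | fuel+1, i, num, d =>
    if i < n then
      match composeB_find byLen ql i lengths with
      | some (L, ent) => composeB_loop byLen lengths ql n fuel (i + L) (num + 1)
                           (d.insert ("e" ++ PySem.Int.toStr num) (String.ofList ent))
      | none => composeB_loop byLen lengths ql n fuel (i + 1) num d
    else d

def compose_entity_dict_alt (entities : String) (question : String) : List (String × String) :=
  let byLen := (PySem.Chars.splitOn entities.toList ['\t']).foldl composeB_step PySem.Dict.empty
  let lengths := PySem.List.sorted byLen.keys (fun x => x) true
  let ql := PySem.Chars.lower question.toList
  (composeB_loop byLen lengths ql (PySem.List.len question.toList) question.toList.length 0 1 PySem.Dict.empty).items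

-- ===== PRECONDITION & SPEC =====
def Spec_compose_entity_dict (entities : String) (question : String) (out : List (String × String)) : Prop := out = compose_entity_dict_alt entities question
instance (entities : String) (question : String) (out : List (String × String)) : Decidable (Spec_compose_entity_dict entities question out) := by unfold Spec_compose_entity_dict; infer_instance

-- ===== CLAIM (what is proved, stated in full; the proofs are below) =====
def Claim_equal_compose_entity_dict : Prop := ∀ (entities : String) (question : String), Dom_compose_entity_dict entities question → Spec_compose_entity_dict entities question (compose_entity_dict entities question)

-- ===== LEMMAS AND PROOFS =====

theorem composeB_step_zero (d : PySem.Dict Int (PySem.Dict (List Char) (List Char))) (r : List Char)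
    (h : PySem.List.len (PySem.Chars.strip r) = 0) : composeB_step d r = d := by
  have h' : PySem.Chars.strip r = [] := by
    simpa only [PySem.List.len_eq, Nat.cast_eq_zero, List.length_eq_zero_iff] using h
  simp [composeB_step, h']

theorem composeB_step_pos (d : PySem.Dict Int (PySem.Dict (List Char) (List Char))) (r : List Char)
    (h : ¬ PySem.List.len (PySem.Chars.strip r) = 0) :
    composeB_step d r =
      d.insert (PySem.List.len (PySem.Chars.strip r))
        (if (d.getD (PySem.List.len (PySem.Chars.strip r)) PySem.Dict.empty).contains (PySem.Chars.lower (PySem.Chars.strip r))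
         then d.getD (PySem.List.len (PySem.Chars.strip r)) PySem.Dict.empty
         else (d.getD (PySem.List.len (PySem.Chars.strip r)) PySem.Dict.empty).insert
                (PySem.Chars.lower (PySem.Chars.strip r)) (PySem.Chars.strip r)) := by
  have h' : ¬ PySem.Chars.strip r = [] := by
    simp only [PySem.List.len_eq, Nat.cast_eq_zero, List.length_eq_zero_iff] at h; exact h
  simp [composeB_step, h']

-- the stripped nonempty entities, in original order (shared shape of both ports' preprocessing)
def pvEnts (raws : List (List Char)) : List (List Char) :=
  (raws.filter (fun e => decide (0 < PySem.List.len (PySem.Chars.strip e)))).map PySem.Chars.strip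

theorem pvEnts_append (raws : List (List Char)) (r : List Char) :
    pvEnts (raws ++ [r]) = pvEnts raws ++ (if PySem.List.len (PySem.Chars.strip r) = 0 then [] else [PySem.Chars.strip r]) := by
  simp only [pvEnts, List.filter_append, List.map_append]
  congr 1
  by_cases h : PySem.List.len (PySem.Chars.strip r) = 0
  · rw [if_pos h]
    simp only [PySem.List.len_eq] at h
    have hd : (PySem.Chars.strip r).length = 0 := by omega
    simp [List.filter, hd]
  · rw [if_neg h]
    simp only [PySem.List.len_eq] at h
    have hd : 0 < (PySem.Chars.strip r).length := by omega
    simp [List.filter, hd]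

theorem pvEnts_ne_nil (raws : List (List Char)) (e : List Char) (he : e ∈ pvEnts raws) : e ≠ [] := by
  simp only [pvEnts, List.mem_map, List.mem_filter, PySem.List.len_eq] at he
  obtain ⟨r, ⟨-, hpos⟩, rfl⟩ := he
  simp only [decide_eq_true_eq] at hpos
  intro hnil
  rw [hnil] at hpos
  simp at hpos

theorem insertBy_append_left {α : Type} (before : α → α → Bool) (x : α) (pre zs : List α)
    (h : ∀ y ∈ pre, before x y = false) :
    PySem.List.insertBy before x (pre ++ zs) = pre ++ PySem.List.insertBy before x zs := by
  induction pre with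
  | nil => simp
  | cons y ys ih =>
    simp only [List.cons_append, PySem.List.insertBy, h y (by simp)]
    simp [ih (fun z hz => h z (by simp [hz]))]

theorem insertBy_eq_cons_of_forall_before {α : Type} (before : α → α → Bool) (x : α) (zs : List α)
    (h : ∀ y ∈ zs, before x y = true) :
    PySem.List.insertBy before x zs = x :: zs := by
  cases zs with
  | nil => rfl
  | cons z zs => simp [PySem.List.insertBy, h z (by simp)]

-- grouping decomposition of the stable reverse sort by key, for any strictly descending cover `ls`
theorem insertBy_flatMap_groups {α : Type} (key : α → Int) (xs : List α) (a : α) (ls : List Int)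
    (hdesc : ls.Pairwise (fun p q => q < p)) (ha : key a ∈ ls) :
    PySem.List.insertBy (fun p q => decide (key q < key p)) a
        (ls.flatMap (fun L => xs.filter (fun e => key e == L)))
      = ls.flatMap (fun L => (xs ++ [a]).filter (fun e => key e == L)) := by
  induction ls with
  | nil => simp at ha
  | cons L ls' ihl =>
    have hlt : ∀ L' ∈ ls', L' < L := fun L' h => (List.pairwise_cons.1 hdesc).1 L' h
    have hkey : ∀ {M : Int} (y : α), y ∈ xs.filter (fun e => key e == M) → key y = M := by
      intro M y hy
      have := (List.mem_filter.1 hy).2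
      simpa using this
    simp only [List.flatMap_cons]
    by_cases hLa : L = key a
    · subst hLa
      rw [insertBy_append_left _ _ _ _ (by
        intro y hy
        have := hkey y hy
        simp [this])]
      rw [insertBy_eq_cons_of_forall_before _ _ _ (by
        intro y hy
        simp only [List.mem_flatMap] at hy
        obtain ⟨M, hM, hyM⟩ := hy
        have := hkey y hyM
        simp only [decide_eq_true_eq, this]
        exact hlt M hM)]
      have hgrp : (xs ++ [a]).filter (fun e => key e == key a) = xs.filter (fun e => key e == key a) ++ [a] := by
        simp [List.filter_append]
      rw [hgrp]
      have hrest : ls'.flatMap (fun L => (xs ++ [a]).filter (fun e => key e == L))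
          = ls'.flatMap (fun L => xs.filter (fun e => key e == L)) := by
        apply List.flatMap_congr
        intro M hM
        have hne : (key a == M) = false := by
          have := hlt M hM
          simp only [beq_eq_false_iff_ne, ne_eq]
          omega
        simp [List.filter_append, List.filter, hne]
      rw [hrest]
      simp
    · have ha' : key a ∈ ls' := by
        cases List.mem_cons.1 ha with
        | inl h => exact absurd h.symm hLa
        | inr h => exact h
      have haL : key a < L := hlt _ ha'
      rw [insertBy_append_left _ _ _ _ (by
        intro y hy
        have := hkey y hy
        simp only [decide_eq_false_iff_not, not_lt, this]
        omega)]
      rw [ihl (List.pairwise_cons.1 hdesc).2 ha']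
      have hgrp : (xs ++ [a]).filter (fun e => key e == L) = xs.filter (fun e => key e == L) := by
        have hne : (key a == L) = false := by
          simp only [beq_eq_false_iff_ne, ne_eq]
          omega
        simp [List.filter_append, List.filter, hne]
      rw [hgrp]

theorem sorted_rev_flatMap {α : Type} (key : α → Int) (xs : List α) (ls : List Int)
    (hdesc : ls.Pairwise (fun a b => b < a)) (hmem : ∀ e ∈ xs, key e ∈ ls) :
    PySem.List.sorted xs key true = ls.flatMap (fun L => xs.filter (fun e => key e == L)) := by
  rw [PySem.List.sorted_rev_eq_foldl_insertBy]
  induction xs using List.reverseRecOn with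
  | nil => simp
  | append_singleton ys a ih =>
    rw [List.foldl_append]
    simp only [List.foldl_cons, List.foldl_nil]
    rw [ih (fun e he => hmem e (by simp [he]))]
    exact insertBy_flatMap_groups key ys a ls hdesc (hmem a (by simp))

-- lookup in the by-length dict = first entity of that length (in original order) with that lowercase form
theorem group_get (raws : List (List Char)) (L : Int) (k : List Char) :
    ((raws.foldl composeB_step PySem.Dict.empty).getD L PySem.Dict.empty).get? k
      = ((pvEnts raws).filter (fun e => PySem.List.len e == L)).find? (fun e => PySem.Chars.lower e == k) := by
  induction raws using List.reverseRecOn generalizing L k with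
  | nil => simp [pvEnts, PySem.Dict.getD_empty, PySem.Dict.get?_empty]
  | append_singleton rs r ih =>
    rw [List.foldl_append, pvEnts_append]
    simp only [List.foldl_cons, List.foldl_nil]
    by_cases h0 : PySem.List.len (PySem.Chars.strip r) = 0
    · rw [composeB_step_zero _ _ h0, if_pos h0, ih]
      simp
    · rw [composeB_step_pos _ _ h0, if_neg h0, List.filter_append, List.find?_append]
      rw [PySem.Dict.getD_insert]
      by_cases hL : L = PySem.List.len (PySem.Chars.strip r)
      · subst hL
        rw [if_pos rfl]
        have hfilt : [PySem.Chars.strip r].filter (fun e => PySem.List.len e == PySem.List.len (PySem.Chars.strip r))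
            = [PySem.Chars.strip r] := by simp
        rw [hfilt]
        by_cases hcont : ((List.foldl composeB_step PySem.Dict.empty rs).getD
            (PySem.List.len (PySem.Chars.strip r)) PySem.Dict.empty).contains (PySem.Chars.lower (PySem.Chars.strip r))
        · rw [if_pos hcont, ih]
          by_cases hk : k = PySem.Chars.lower (PySem.Chars.strip r)
          · subst hk
            have hsome := hcont
            rw [PySem.Dict.contains_eq_isSome_get?, ih] at hsome
            cases hfs : List.find? (fun e => PySem.Chars.lower e == PySem.Chars.lower (PySem.Chars.strip r))
                (List.filter (fun e => PySem.List.len e == PySem.List.len (PySem.Chars.strip r)) (pvEnts rs)) with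
            | none => rw [hfs] at hsome; simp at hsome
            | some a => rw [Option.some_or]
          · have hk' : PySem.Chars.lower (PySem.Chars.strip r) ≠ k := fun hh => hk hh.symm
            have hb : (PySem.Chars.lower (PySem.Chars.strip r) == k) = false := by simpa using hk'
            have hsingle : List.find? (fun e => PySem.Chars.lower e == k) [PySem.Chars.strip r] = none := by
              simp [List.find?, hb]
            rw [hsingle, Option.or_none]
        · rw [if_neg hcont, PySem.Dict.get?_insert]
          have hnone : List.find? (fun e => PySem.Chars.lower e == PySem.Chars.lower (PySem.Chars.strip r))
              (List.filter (fun e => PySem.List.len e == PySem.List.len (PySem.Chars.strip r)) (pvEnts rs)) = none := by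
            have hh := hcont
            rw [PySem.Dict.contains_eq_isSome_get?, ih] at hh
            simpa using hh
          by_cases hk : k = PySem.Chars.lower (PySem.Chars.strip r)
          · subst hk
            rw [if_pos rfl, hnone, Option.none_or]
            simp [List.find?]
          · rw [if_neg hk, ih]
            have hk' : PySem.Chars.lower (PySem.Chars.strip r) ≠ k := fun hh => hk hh.symm
            have hb : (PySem.Chars.lower (PySem.Chars.strip r) == k) = false := by simpa using hk'
            have hsingle : List.find? (fun e => PySem.Chars.lower e == k) [PySem.Chars.strip r] = none := by
              simp [List.find?, hb]
            rw [hsingle, Option.or_none]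
      · rw [if_neg hL, ih]
        have hL' : PySem.List.len (PySem.Chars.strip r) ≠ L := fun hh => hL hh.symm
        have hb : (PySem.List.len (PySem.Chars.strip r) == L) = false := by simpa using hL'
        simp only [PySem.List.len_eq] at hb
        have hfilt : List.filter (fun e => PySem.List.len e == L) [PySem.Chars.strip r] = [] := by
          simp [List.filter, hb]
        rw [hfilt, List.find?_nil, Option.or_none]

theorem group_keys (raws : List (List Char)) :
    (raws.foldl composeB_step PySem.Dict.empty).keys = PySem.Set.ofList ((pvEnts raws).map PySem.List.len) := by
  induction raws using List.reverseRecOn with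
  | nil => rfl
  | append_singleton rs r ih =>
    rw [List.foldl_append, pvEnts_append]
    simp only [List.foldl]
    by_cases h0 : PySem.List.len (PySem.Chars.strip r) = 0
    · rw [composeB_step_zero _ _ h0, if_pos h0, ih]
      simp
    · rw [composeB_step_pos _ _ h0, if_neg h0]
      simp only [List.map_append, List.map_cons, List.map_nil]
      rw [show PySem.Set.ofList (List.map PySem.List.len (pvEnts rs) ++ [PySem.List.len (PySem.Chars.strip r)])
            = PySem.Set.add (PySem.Set.ofList (List.map PySem.List.len (pvEnts rs))) (PySem.List.len (PySem.Chars.strip r)) from by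
        simp [PySem.Set.ofList, List.foldl_append]]
      by_cases hc : (List.foldl composeB_step PySem.Dict.empty rs).contains (PySem.List.len (PySem.Chars.strip r))
      · rw [PySem.Dict.keys_insert_of_contains _ _ hc, ih]
        have : (PySem.Set.ofList (List.map PySem.List.len (pvEnts rs))).contains (PySem.List.len (PySem.Chars.strip r)) = true := by
          rw [← ih]
          rw [PySem.Dict.contains_iff_mem_keys] at hc
          simpa [List.contains_iff_mem] using hc
        rw [PySem.Set.add, if_pos this]
      · rw [PySem.Dict.keys_insert_of_not_contains _ _ (by simpa using hc), ih]
        have : (PySem.Set.ofList (List.map PySem.List.len (pvEnts rs))).contains (PySem.List.len (PySem.Chars.strip r)) = false := by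
          rw [← ih]
          rw [Bool.eq_false_iff]
          intro hcc
          exact hc ((PySem.Dict.contains_iff_mem_keys _ _).2 (by simpa [List.contains_iff_mem] using hcc))
        rw [PySem.Set.add, if_neg (by rw [this]; simp)]

theorem find?_congr_mem {α : Type} (l : List α) (p q : α → Bool) (h : ∀ a ∈ l, p a = q a) :
    l.find? p = l.find? q := by
  induction l with
  | nil => rfl
  | cons a l ih =>
    simp only [List.find?_cons, h a (by simp)]
    cases hq : q a
    · exact ih (fun b hb => h b (List.mem_cons_of_mem _ hb))
    · rfl

theorem slice_lower (s : List Char) (a b : Int) :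
    PySem.List.slice (PySem.Chars.lower s) (some a) (some b)
      = PySem.Chars.lower (PySem.List.slice s (some a) (some b)) := by
  simp [PySem.Chars.lower, PySem.List.slice]

theorem find_over_groups (raws : List (List Char)) (q : List Char) (i : Int) (ms : List Int) :
    composeB_find (raws.foldl composeB_step PySem.Dict.empty) (PySem.Chars.lower q) i ms
      = ((ms.flatMap (fun L => (pvEnts raws).filter (fun e => PySem.List.len e == L))).find?
          (composeA_pred q i)).map (fun e => (PySem.List.len e, e)) := by
  induction ms with
  | nil => rfl
  | cons L rest ih =>
    simp only [composeB_find, List.flatMap_cons, List.find?_append]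
    rw [group_get, slice_lower]
    have hcongr : ((pvEnts raws).filter (fun e => PySem.List.len e == L)).find? (composeA_pred q i)
        = ((pvEnts raws).filter (fun e => PySem.List.len e == L)).find?
            (fun e => PySem.Chars.lower e == PySem.Chars.lower (PySem.List.slice q (some i) (some (i + L)))) := by
      apply find?_congr_mem
      intro e he
      have hlen : PySem.List.len e = L := by simpa using (List.mem_filter.1 he).2
      have hne : e ≠ [] := pvEnts_ne_nil raws e (List.mem_filter.1 he).1
      have hlen0 : ¬ PySem.List.len e = 0 := by
        simp only [PySem.List.len_eq, Nat.cast_eq_zero, List.length_eq_zero_iff]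
        exact hne
      have hpos : decide (0 < PySem.List.len e) = true := by
        simp only [PySem.List.len_eq] at hlen0 ⊢
        simp only [decide_eq_true_eq]
        omega
      unfold composeA_pred
      rw [if_neg hlen0, hpos, Bool.and_true, hlen]
      exact Bool.beq_comm
    rw [hcongr]
    cases hfind : ((pvEnts raws).filter (fun e => PySem.List.len e == L)).find?
        (fun e => PySem.Chars.lower e == PySem.Chars.lower (PySem.List.slice q (some i) (some (i + L)))) with
    | none => rw [Option.none_or]; exact ih
    | some ent =>
      rw [Option.some_or, Option.map_some]
      have hm := List.mem_of_find?_eq_some hfind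
      have hlen : PySem.List.len ent = L := by simpa using (List.mem_filter.1 hm).2
      rw [hlen]

-- per-position equality of the two searches
theorem find_eq (raws : List (List Char)) (q : List Char) (i : Int) :
    composeB_find (raws.foldl composeB_step PySem.Dict.empty) (PySem.Chars.lower q) i
        (PySem.List.sorted (raws.foldl composeB_step PySem.Dict.empty).keys (fun x => x) true)
      = ((PySem.List.sorted (pvEnts raws) (fun e => PySem.List.len e) true).find? (composeA_pred q i)).map
          (fun e => (PySem.List.len e, e)) := by
  have hkeys := group_keys raws
  have hnodupkeys : (raws.foldl composeB_step PySem.Dict.empty).keys.Nodup := by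
    rw [hkeys]; exact PySem.Set.nodup_ofList _
  have hnodup : (PySem.List.sorted (raws.foldl composeB_step PySem.Dict.empty).keys (fun x => x) true).Nodup :=
    (PySem.List.sorted_perm _ _ _).symm.nodup hnodupkeys
  have hle := PySem.List.sorted_pairwise_rev (raws.foldl composeB_step PySem.Dict.empty).keys (fun x => x)
  have hdesc : (PySem.List.sorted (raws.foldl composeB_step PySem.Dict.empty).keys (fun x => x) true).Pairwise
      (fun a b => b < a) := by
    have := hle.and hnodup
    exact this.imp (fun h => lt_of_le_of_ne h.1 (Ne.symm h.2))
  have hmem : ∀ e ∈ pvEnts raws, PySem.List.len e ∈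
      PySem.List.sorted (raws.foldl composeB_step PySem.Dict.empty).keys (fun x => x) true := by
    intro e he
    rw [PySem.List.mem_sorted, hkeys, PySem.Set.mem_ofList]
    exact List.mem_map_of_mem he
  rw [sorted_rev_flatMap (fun e => PySem.List.len e) (pvEnts raws) _ hdesc hmem]
  exact find_over_groups raws q i _

theorem loop_eq (raws : List (List Char)) (q : List Char) (fuel : Nat) (i num : Int)
    (d : PySem.Dict String String) :
    composeB_loop (raws.foldl composeB_step PySem.Dict.empty)
        (PySem.List.sorted (raws.foldl composeB_step PySem.Dict.empty).keys (fun x => x) true)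
        (PySem.Chars.lower q) (PySem.List.len q) fuel i num d
      = composeA_loop (PySem.List.sorted (pvEnts raws) (fun e => PySem.List.len e) true) q fuel i num d := by
  induction fuel generalizing i num d with
  | zero => rfl
  | succ fuel ih =>
    simp only [composeA_loop, composeB_loop, find_eq raws q i]
    cases h : (PySem.List.sorted (pvEnts raws) (fun e => PySem.List.len e) true).find? (composeA_pred q i) with
    | none =>
      simp only [PySem.List.len_eq] at ih ⊢
      split_ifs
      · exact ih _ _ _
      · rfl
    | some e =>
      simp only [PySem.List.len_eq] at ih ⊢
      split_ifs
      · exact ih _ _ _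
      · rfl

-- ===== VERDICT (by name: the statement is the Claim_ definition above) =====
theorem compose_entity_dict_spec : Claim_equal_compose_entity_dict := by
  intro entities question _
  show _ = _
  unfold compose_entity_dict compose_entity_dict_alt
  have := loop_eq (PySem.Chars.splitOn entities.toList ['\t']) question.toList
    question.toList.length 0 1 PySem.Dict.empty
  unfold pvEnts at this
  simp only [PySem.List.len_eq] at this ⊢
  rw [← this]
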